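-- pv_equiv track=rewrite | github.com/egv/dora | agents/collectors/event_collector.py | _estimate_attendance
-- ===== SOURCE A (Python) =====
-- def _estimate_attendance(event_name: str) -> int:
--     """Estimate attendance based on event type"""
--     event_name_lower = event_name.lower()
--
--     if any(word in event_name_lower for word in ["festival", "marathon", "parade"]):
--         return 5000
--     elif any(word in event_name_lower for word in ["concert", "game", "match"]):
--         return 2000
--     elif any(word in event_name_lower for word in ["conference", "summit"]):
--         return 500
--     elif any(word in event_name_lower for word in ["market", "fair"]):
--         return 300
--     elif any(word in event_name_lower for word in ["exhibition", "gallery"]):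
--         return 100
--     else:
--         return 150
-- ===== SOURCE B (Python) =====
-- _KEYWORD_ESTIMATES = {
--     "festival": 5000, "marathon": 5000, "parade": 5000,
--     "concert": 2000, "game": 2000, "match": 2000,
--     "conference": 500, "summit": 500,
--     "market": 300, "fair": 300,
--     "exhibition": 100, "gallery": 100,
-- }
--
-- def _estimate_attendance(event_name: str) -> int:
--     """Estimate attendance based on event type"""
--     name = event_name.lower()
--     hits = [est for kw, est in _KEYWORD_ESTIMATES.items() if kw in name]
--     return max(hits, default=150)
-- ===== Notes on version B (the rewrite author's own statement) =====
-- stated objective: alternative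
-- what changed: Instead of an ordered first-match if/elif chain, B collects the estimates of ALL keywords occurring in the lowercased name and returns their maximum (default 150); this is order-independent and correct because the chain's estimates strictly decrease with priority, so max of matches equals first match.
import Mathlib
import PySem

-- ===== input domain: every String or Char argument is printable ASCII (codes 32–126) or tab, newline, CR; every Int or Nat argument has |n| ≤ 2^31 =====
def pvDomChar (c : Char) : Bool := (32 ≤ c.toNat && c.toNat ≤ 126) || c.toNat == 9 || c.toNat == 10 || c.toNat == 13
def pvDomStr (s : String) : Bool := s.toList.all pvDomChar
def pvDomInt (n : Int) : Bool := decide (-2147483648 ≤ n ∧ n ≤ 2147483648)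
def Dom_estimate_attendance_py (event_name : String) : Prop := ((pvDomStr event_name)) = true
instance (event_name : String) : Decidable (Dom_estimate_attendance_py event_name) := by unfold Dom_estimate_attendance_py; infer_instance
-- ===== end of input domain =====

-- B replaces A's ordered first-match if/elif chain by collecting the estimates of all matching
-- keywords and taking their maximum (default 150); correct because the chain's estimates strictly
-- decrease with priority (objective: alternative).

-- ===== PORT A =====
def estimate_attendance_py (event_name : String) : Int :=
  let event_name_lower := PySem.Str.lower event_name
  if (["festival", "marathon", "parade"].any fun word => PySem.Str.isIn word event_name_lower) then 5000
  else if (["concert", "game", "match"].any fun word => PySem.Str.isIn word event_name_lower) then 2000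
  else if (["conference", "summit"].any fun word => PySem.Str.isIn word event_name_lower) then 500
  else if (["market", "fair"].any fun word => PySem.Str.isIn word event_name_lower) then 300
  else if (["exhibition", "gallery"].any fun word => PySem.Str.isIn word event_name_lower) then 100
  else 150

-- ===== PORT B =====
def pvKeywordEstimates : List (String × Int) :=
  [("festival", 5000), ("marathon", 5000), ("parade", 5000),
   ("concert", 2000), ("game", 2000), ("match", 2000),
   ("conference", 500), ("summit", 500),
   ("market", 300), ("fair", 300),
   ("exhibition", 100), ("gallery", 100)]

def estimate_attendance_py_alt (event_name : String) : Int :=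
  let name := PySem.Str.lower event_name
  let hits := pvKeywordEstimates.filterMap
    (fun kv => if PySem.Str.isIn kv.1 name then some kv.2 else none)
  (PySem.List.max? hits (fun x => x)).getD 150

-- ===== PRECONDITION & SPEC =====
def Spec_estimate_attendance_py (event_name : String) (out : Int) : Prop := out = estimate_attendance_py_alt event_name
instance (event_name : String) (out : Int) : Decidable (Spec_estimate_attendance_py event_name out) := by unfold Spec_estimate_attendance_py; infer_instance

-- ===== CLAIM =====
def Claim_equal_estimate_attendance_py : Prop := ∀ (event_name : String), Dom_estimate_attendance_py event_name → Spec_estimate_attendance_py event_name (estimate_attendance_py event_name)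

-- ===== LEMMAS AND PROOFS =====

-- first-match scan over (matched?, estimate) pairs: the shape of A's chain at atom level
def pvFirstTrue : List (Bool × Int) → Int → Int
  | [], d => d
  | (b, v) :: t, d => if b then v else pvFirstTrue t d

theorem pvFoldlMaxEq (v : Int) (l : List Int) (h : ∀ x ∈ l, x ≤ v) : l.foldl max v = v := by
  induction l generalizing v with
  | nil => rfl
  | cons a t ih =>
    have hav : max v a = v := max_eq_left (h a (List.mem_cons_self ..))
    simp only [List.foldl_cons, hav]
    exact ih v fun x hx => h x (List.mem_cons_of_mem _ hx)

-- with estimates weakly decreasing along the list, max of all matches = first match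
theorem pvMaxEqFirst (l : List (Bool × Int)) (d : Int)
    (h : l.Pairwise (fun a b => b.2 ≤ a.2)) :
    (PySem.List.max? (l.filterMap (fun p => if p.1 then some p.2 else none)) (fun x => x)).getD d
      = pvFirstTrue l d := by
  induction l with
  | nil => simp [pvFirstTrue, PySem.List.max?]
  | cons p t ih =>
    obtain ⟨hp, ht⟩ := List.pairwise_cons.mp h
    cases hb : p.1 with
    | false => simpa [pvFirstTrue, hb] using ih ht
    | true =>
      have hle : ∀ x ∈ t.filterMap (fun q => if q.1 then some q.2 else none), x ≤ p.2 := by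
        intro x hx
        obtain ⟨q, hq, hqx⟩ := List.mem_filterMap.mp hx
        by_cases hq1 : q.1 = true
        · simp only [hq1, if_true, Option.some_inj] at hqx
          exact hqx ▸ hp q hq
        · simp [hq1] at hqx
      simp only [List.filterMap_cons, hb, if_true, PySem.List.max?_id_cons, Option.getD_some,
        pvFirstTrue]
      exact pvFoldlMaxEq _ _ hle

-- ===== VERDICT =====
theorem estimate_attendance_py_spec : Claim_equal_estimate_attendance_py := by
  intro e _
  show estimate_attendance_py e = estimate_attendance_py_alt e
  simp only [estimate_attendance_py, estimate_attendance_py_alt]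
  have hmap : pvKeywordEstimates.filterMap
      (fun kv => if PySem.Str.isIn kv.1 (PySem.Str.lower e) then some kv.2 else none)
      = ((pvKeywordEstimates.map
            (fun kv => (PySem.Str.isIn kv.1 (PySem.Str.lower e), kv.2))).filterMap
          (fun p => if p.1 then some p.2 else none)) := by
    rw [List.filterMap_map]; rfl
  rw [hmap, pvMaxEqFirst _ 150 (by
    simp only [pvKeywordEstimates, List.map_cons, List.map_nil, List.pairwise_cons,
      List.mem_cons, List.not_mem_nil]
    norm_num)]
  simp only [pvKeywordEstimates, List.map_cons, List.map_nil, pvFirstTrue,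
    List.any_cons, List.any_nil, Bool.or_false]
  generalize PySem.Str.isIn "festival" (PySem.Str.lower e) = x1
  generalize PySem.Str.isIn "marathon" (PySem.Str.lower e) = x2
  generalize PySem.Str.isIn "parade" (PySem.Str.lower e) = x3
  generalize PySem.Str.isIn "concert" (PySem.Str.lower e) = x4
  generalize PySem.Str.isIn "game" (PySem.Str.lower e) = x5
  generalize PySem.Str.isIn "match" (PySem.Str.lower e) = x6
  generalize PySem.Str.isIn "conference" (PySem.Str.lower e) = x7
  generalize PySem.Str.isIn "summit" (PySem.Str.lower e) = x8
  generalize PySem.Str.isIn "market" (PySem.Str.lower e) = x9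
  generalize PySem.Str.isIn "fair" (PySem.Str.lower e) = x10
  generalize PySem.Str.isIn "exhibition" (PySem.Str.lower e) = x11
  generalize PySem.Str.isIn "gallery" (PySem.Str.lower e) = x12
  revert x1 x2 x3 x4 x5 x6 x7 x8 x9 x10 x11 x12
  decide
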